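-- pv_equiv track=rewrite | github.com/jeff-donovan/aoc-2024 | day_21/part2_attempt7.py | numerical_to_direction
-- ===== SOURCE A (Python) =====
-- def numerical_to_direction(numerical_paths, code):
--     sequences = ['']
--     for i in range(len(code)):
--         if i == 0:
--             start = 'A'
--         else:
--             start = code[i - 1]
--         end = code[i]
--         paths = numerical_paths[(start, end)]
--         new_sequences = []
--         for path in paths:
--             for seq in sequences:
--                 new_sequences.append(seq + path)
--         sequences = new_sequences
--     return tidy_up(sequences)  # TODO: maybe we shouldn't tidy
--
-- def tidy_up(sequences):
--     min_length = calculate_min_path_length(sequences)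
--     return [seq for seq in sequences if len(seq) == min_length]
--
-- def calculate_min_path_length(paths):
--     return min([len(path) for path in paths])
-- ===== SOURCE B (Python) =====
-- def numerical_to_direction(numerical_paths, code):
--     # prune each transition's paths to the minimal-length ones, then combine;
--     # no final global filter is needed
--     sequences = ['']
--     for start, end in zip('A' + code, code):
--         paths = numerical_paths[(start, end)]
--         m = min(len(p) for p in paths)
--         best = [p for p in paths if len(p) == m]
--         sequences = [seq + p for p in best for seq in sequences]
--     return sequences
-- ===== Notes on version B (the rewrite author's own statement) =====
-- stated objective: alternative
-- what changed: A builds the full Cartesian product of all per-transition paths and only then filters by the global minimum length; B prunes each transition's path list to its minimal-length paths first and combines only those, so no final global filter pass exists.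
import Mathlib
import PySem

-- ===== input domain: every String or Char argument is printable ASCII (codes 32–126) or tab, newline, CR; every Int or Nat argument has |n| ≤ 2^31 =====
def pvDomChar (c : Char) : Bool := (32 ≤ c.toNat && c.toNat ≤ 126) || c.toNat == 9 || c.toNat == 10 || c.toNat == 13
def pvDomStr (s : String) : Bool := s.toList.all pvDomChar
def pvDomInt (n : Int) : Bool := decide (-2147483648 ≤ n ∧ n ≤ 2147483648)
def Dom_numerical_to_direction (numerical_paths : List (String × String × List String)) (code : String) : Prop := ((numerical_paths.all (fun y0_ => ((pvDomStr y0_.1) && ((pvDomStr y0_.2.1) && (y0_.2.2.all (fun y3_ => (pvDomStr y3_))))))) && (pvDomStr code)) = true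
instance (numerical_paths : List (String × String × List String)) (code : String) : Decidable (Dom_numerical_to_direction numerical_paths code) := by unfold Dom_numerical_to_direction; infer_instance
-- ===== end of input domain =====

-- B prunes each transition's path list to its minimal-length paths before combining,
-- instead of A's full product followed by a global minimum-length filter (alternative decomposition, same result).


-- ===== PORT A =====
-- dict lookup numerical_paths[(start, end)] with 1-char-string keys (assoc list, first match);
-- none = KeyError (excluded by Pre_); strings are handled as char lists (exact)
def pvLookup (np : List (String × String × List String)) (a b : Char) : Option (List String) :=
  match np with
  | [] => none
  | (k1, k2, v) :: rest =>
      if k1.toList = [a] ∧ k2.toList = [b] then some v else pvLookup rest a b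

-- min([len(path) for path in paths]); the .getD 0 default is reached only where Python's min([]) raises ValueError (outside Pre_)
def pvMinLen (seqs : List (List Char)) : Nat := ((seqs.map List.length).min?).getD 0

-- one iteration of A's product loop: for path in paths: for seq in sequences: new_sequences.append(seq + path)
def ntdStepA (np : List (String × String × List String)) (seqs : List (List Char)) (t : Char × Char) : List (List Char) :=
  (((pvLookup np t.1 t.2).getD []).map String.toList).flatMap
    (fun path => seqs.map (fun seq => seq ++ path))

-- A's 'for i in range(len(code))' with start = 'A' (i == 0) or code[i-1], end = code[i], carried as prev
def ntdLoopA (np : List (String × String × List String)) :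
    List Char → Char → List (List Char) → List (List Char)
  | [], _, seqs => seqs
  | c :: rest, prev, seqs => ntdLoopA np rest c (ntdStepA np seqs (prev, c))

-- tidy_up
def pvTidyUp (seqs : List (List Char)) : List (List Char) :=
  seqs.filter (fun s => s.length == pvMinLen seqs)

def numerical_to_direction (numerical_paths : List (String × String × List String)) (code : String) : List String :=
  (pvTidyUp (ntdLoopA numerical_paths code.toList 'A' [[]])).map (fun cs => String.ofList cs)

-- ===== PORT B =====
-- one iteration of B's loop: prune paths to the minimal-length ones, then the same product build
def ntdStepB (np : List (String × String × List String)) (seqs : List (List Char)) (t : Char × Char) : List (List Char) :=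
  let paths := ((pvLookup np t.1 t.2).getD []).map String.toList
  let m := pvMinLen paths
  (paths.filter (fun p => p.length == m)).flatMap (fun p => seqs.map (fun seq => seq ++ p))

-- B's 'for start, end in zip('A' + code, code)'
def numerical_to_direction_alt (numerical_paths : List (String × String × List String)) (code : String) : List String :=
  let cs := code.toList
  (List.foldl (ntdStepB numerical_paths) [[]] (List.zip ('A' :: cs) cs)).map (fun s => String.ofList s)

-- ===== PRECONDITION & SPEC =====
-- Pre_ excludes exactly the inputs where A raises: a missing (start,end) key (KeyError)
-- or a needed path list that is empty (ValueError from min([])); B raises there too.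
def Pre_numerical_to_direction (numerical_paths : List (String × String × List String)) (code : String) : Prop :=
  ∀ t ∈ List.zip ('A' :: code.toList) code.toList,
    (((numerical_paths.find? (fun e =>
        e.1 == String.ofList [t.1] && e.2.1 == String.ofList [t.2])).map (fun e => e.2.2)).getD []) ≠ []
instance (numerical_paths : List (String × String × List String)) (code : String) : Decidable (Pre_numerical_to_direction numerical_paths code) := by unfold Pre_numerical_to_direction; infer_instance

def pvWitness_numerical_to_direction : (List (String × String × List String)) × String :=
  ([("A", "2", ["^"]), ("2", "9", [">^", "^>"])], "29")

def Spec_numerical_to_direction (numerical_paths : List (String × String × List String)) (code : String) (out : List String) : Prop := out = numerical_to_direction_alt numerical_paths code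
instance (numerical_paths : List (String × String × List String)) (code : String) (out : List String) : Decidable (Spec_numerical_to_direction numerical_paths code out) := by unfold Spec_numerical_to_direction; infer_instance

-- ===== CLAIM (what is proved, stated in full; the proofs are below) =====
def Claim_equal_numerical_to_direction : Prop := ∀ (numerical_paths : List (String × String × List String)) (code : String), Dom_numerical_to_direction numerical_paths code → Pre_numerical_to_direction numerical_paths code → Spec_numerical_to_direction numerical_paths code (numerical_to_direction numerical_paths code)

-- ===== LEMMAS AND PROOFS =====

-- the port's assoc-list lookup is List.find? on the key
theorem pvLookup_eq_find? (np : List (String × String × List String)) (a b : Char) :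
    pvLookup np a b = (np.find? (fun e =>
        e.1 == String.ofList [a] && e.2.1 == String.ofList [b])).map (fun e => e.2.2) := by
  induction np with
  | nil => rfl
  | cons e rest ih =>
      obtain ⟨k1, k2, v⟩ := e
      have h1 : (k1 == String.ofList [a]) = decide (k1.toList = [a]) := by
        rcases eq_or_ne k1.toList [a] with h | h
        · simp [String.toList_inj.mp (by simp [h] : k1.toList = (String.ofList [a]).toList)]
        · simp [h]; intro hk; exact h (by simp [hk])
      have h2 : (k2 == String.ofList [b]) = decide (k2.toList = [b]) := by
        rcases eq_or_ne k2.toList [b] with h | h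
        · simp [String.toList_inj.mp (by simp [h] : k2.toList = (String.ofList [b]).toList)]
        · simp [h]; intro hk; exact h (by simp [hk])
      simp only [pvLookup, List.find?, h1, h2]
      by_cases ha : k1.toList = [a] <;> by_cases hb : k2.toList = [b] <;> simp [ha, hb, ih]

theorem pvWitness_ok :
    Dom_numerical_to_direction pvWitness_numerical_to_direction.1 pvWitness_numerical_to_direction.2 ∧
    Pre_numerical_to_direction pvWitness_numerical_to_direction.1 pvWitness_numerical_to_direction.2 := by
  decide

-- A's prev-carrying recursion is a fold of ntdStepA over the transition list zip (prev :: cs) cs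
theorem ntdLoopA_eq_foldl (np : List (String × String × List String)) :
    ∀ (cs : List Char) (prev : Char) (seqs : List (List Char)),
      ntdLoopA np cs prev seqs =
        List.foldl (ntdStepA np) seqs (List.zip (prev :: cs) cs) := by
  intro cs
  induction cs with
  | nil => intro prev seqs; rfl
  | cons c rest ih => intro prev seqs; simp [ntdLoopA, List.zip, ih]

theorem min?_of_ne_nil (l : List Nat) (h : l ≠ []) : ∃ a, l.min? = some a := by
  cases l with
  | nil => exact absurd rfl h
  | cons x xs => exact ⟨_, List.min?_cons⟩

-- pvMinLen of a nonempty list is attained and is a lower bound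
theorem pvMinLen_spec (seqs : List (List Char)) (h : seqs ≠ []) :
    (∃ s ∈ seqs, s.length = pvMinLen seqs) ∧ ∀ s ∈ seqs, pvMinLen seqs ≤ s.length := by
  have hmap : seqs.map List.length ≠ [] := by simp [h]
  obtain ⟨a, ha⟩ := min?_of_ne_nil _ hmap
  rw [List.min?_eq_some_iff] at ha
  have hval : pvMinLen seqs = a := by simp only [pvMinLen]; rw [show (seqs.map List.length).min? = some a from by rw [List.min?_eq_some_iff]; exact ha]; rfl
  obtain ⟨⟨s, hs, hlen⟩, hlb⟩ := And.intro (List.mem_map.mp ha.1) ha.2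
  refine ⟨⟨s, hs, by rw [hval, hlen]⟩, ?_⟩
  intro s' hs'
  rw [hval]
  exact hlb _ (List.mem_map_of_mem hs')

theorem flatMap_filter_eq (l : List (List Char)) (q : List Char → Bool) (f : List Char → List (List Char)) :
    (l.filter q).flatMap f = l.flatMap (fun a => if q a then f a else []) := by
  induction l with
  | nil => rfl
  | cons x xs ih =>
      by_cases hx : q x <;> simp [hx, ih]

-- core: tidying the product of one step equals the product of the pruned paths with the tidied sequences
theorem tidy_step (np : List (String × String × List String)) (t : Char × Char)
    (seqs : List (List Char)) (hs : seqs ≠ [])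
    (hp : ((pvLookup np t.1 t.2).getD []) ≠ []) :
    pvTidyUp (ntdStepA np seqs t) = ntdStepB np (pvTidyUp seqs) t := by
  set P : List (List Char) := ((pvLookup np t.1 t.2).getD []).map String.toList with hP
  have hPne : P ≠ [] := by simp [hP, hp]
  set mS := pvMinLen seqs with hmS
  set mP := pvMinLen P with hmP
  obtain ⟨⟨s0, hs0, hs0len⟩, hSlb⟩ := pvMinLen_spec seqs hs
  obtain ⟨⟨p0, hp0, hp0len⟩, hPlb⟩ := pvMinLen_spec P hPne
  -- the global minimum length of the product is mS + mP
  have hmin : pvMinLen (ntdStepA np seqs t) = mS + mP := by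
    have hmem : (s0 ++ p0).length ∈ (ntdStepA np seqs t).map List.length := by
      refine List.mem_map_of_mem ?_
      simp only [ntdStepA, ← hP, List.mem_flatMap]
      exact ⟨p0, hp0, List.mem_map_of_mem hs0⟩
    have hlb : ∀ n ∈ (ntdStepA np seqs t).map List.length, mS + mP ≤ n := by
      intro n hn
      obtain ⟨x, hx, rfl⟩ := List.mem_map.mp hn
      simp only [ntdStepA, ← hP, List.mem_flatMap, List.mem_map] at hx
      obtain ⟨p, hpmem, s, hsmem, rfl⟩ := hx
      have := hSlb s hsmem
      have := hPlb p hpmem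
      simp only [List.length_append]
      omega
    have : ((ntdStepA np seqs t).map List.length).min? = some ((s0 ++ p0).length) := by
      rw [List.min?_eq_some_iff]
      refine ⟨hmem, ?_⟩
      intro b hb
      have := hlb b hb
      simp only [List.length_append, hs0len, hp0len]
      omega
    have hmv : pvMinLen (ntdStepA np seqs t) = (s0 ++ p0).length := by
      simp [pvMinLen, this]
    rw [hmv, List.length_append, hs0len, hp0len]
  -- unfold both sides to flatMaps over P and compare pointwise on members of P
  show (ntdStepA np seqs t).filter (fun s => s.length == pvMinLen (ntdStepA np seqs t)) = _
  rw [hmin]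
  simp only [ntdStepA, ntdStepB, ← hP, ← hmP]
  rw [List.filter_flatMap, flatMap_filter_eq]
  refine List.flatMap_congr ?_
  intro p hpmem
  by_cases hlp : p.length = mP
  · have : ∀ s : List Char, ((s ++ p).length == mS + mP) = (s.length == mS) := by
      intro s; simp only [List.length_append, hlp]
      rcases eq_or_ne s.length mS with h | h
      · simp [h]
      · simp [h]
    simp only [List.filter_map, Function.comp_def, this, hlp]
    simp [pvTidyUp, ← hmS]
  · have hgt : mP < p.length := lt_of_le_of_ne (hPlb p hpmem) (fun h => hlp h.symm)
    have : (seqs.map (fun seq => seq ++ p)).filter (fun s => s.length == mS + mP) = [] := by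
      rw [List.filter_eq_nil_iff]
      intro a ha
      obtain ⟨s, hsmem, rfl⟩ := List.mem_map.mp ha
      have := hSlb s hsmem
      simp only [List.length_append, beq_iff_eq]
      omega
    simp [this, hlp]

theorem stepA_ne_nil (np : List (String × String × List String)) (t : Char × Char)
    (seqs : List (List Char)) (hs : seqs ≠ [])
    (hp : ((pvLookup np t.1 t.2).getD []) ≠ []) :
    ntdStepA np seqs t ≠ [] := by
  simp only [ntdStepA, ne_eq, List.flatMap_eq_nil_iff]
  intro h
  obtain ⟨p, hpmem⟩ := List.exists_mem_of_ne_nil _ (by simpa using hp : ((pvLookup np t.1 t.2).getD []).map String.toList ≠ [])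
  have := h p hpmem
  simp [hs] at this

-- the invariant: tidying after the full product equals folding the pruning step over tidied sequences
theorem main_invariant (np : List (String × String × List String)) :
    ∀ (ts : List (Char × Char)) (seqs : List (List Char)), seqs ≠ [] →
      (∀ t ∈ ts, ((pvLookup np t.1 t.2).getD []) ≠ []) →
      pvTidyUp (List.foldl (ntdStepA np) seqs ts) =
        List.foldl (ntdStepB np) (pvTidyUp seqs) ts := by
  intro ts
  induction ts with
  | nil => intro seqs _ _; rfl
  | cons t ts ih =>
      intro seqs hs hpre
      have hp := hpre t (List.mem_cons_self ..)
      simp only [List.foldl_cons]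
      rw [ih _ (stepA_ne_nil np t seqs hs hp) (fun u hu => hpre u (List.mem_cons_of_mem _ hu)),
          tidy_step np t seqs hs hp]

-- ===== VERDICT (by name: the statement is the Claim_ definition above) =====
theorem numerical_to_direction_spec : Claim_equal_numerical_to_direction := by
  intro np code _ hpre
  show _ = _
  unfold numerical_to_direction numerical_to_direction_alt
  have hpre' : ∀ t ∈ List.zip ('A' :: code.toList) code.toList,
      ((pvLookup np t.1 t.2).getD []) ≠ [] := by
    intro t ht
    have := hpre t ht
    rw [pvLookup_eq_find?]
    exact this
  rw [ntdLoopA_eq_foldl, main_invariant np _ [[]] (by simp) hpre']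
  rfl
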